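-- pv_equiv track=rewrite | github.com/SeolJaeHyeok/TIL | Algorithm/Study/Week7/16935.py | process
-- ===== SOURCE A (Python) =====
-- def process(operations, array):
--     for op in operations:
--         if op == 1:
--             # 1번 연산 - 상하 반전
--             for i in range(len(array) // 2):
--                 array[i], array[-1-i] = array[-1-i], array[i]
--         elif op == 2:
--             # 2번 연산 - 좌우 반전
--             for i in range(len(array)):
--                 array[i].reverse()
--         elif op == 3:
--             # 3번 연산 - 오른쪽 90도 회전
--             # 먼저 상하 반전 시키고
--             for i in range(len(array) // 2):
--                 array[i], array[-1-i] = array[-1-i], array[i]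
--
--             # 열과 행 바꿔주기
--             tmp_arr = [[] for _ in range(len(array[0]))]
--             for i in range(len(array[0])):
--                 for j in range(len(array)):
--                     tmp_arr[i].append(array[j][i])
--
--             array = tmp_arr
--         elif op == 4:
--             # 4번 연산 - 왼쪽으로 90도 회전
--             # 먼저 좌우 반전 시키고
--             for i in range(len(array)):
--                 array[i].reverse()
--
--             # 열과 행 바꿔주기
--             tmp_arr = [[] for _ in range(len(array[0]))]
--             for i in range(len(array[0])):
--                 for j in range(len(array)):
--                     tmp_arr[i].append(array[j][i])
--
--             array = tmp_arr
--         elif op == 5: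
--             # 5번 연산
--             one = []
--             two = []
--             three = []
--             four = []
--
--             col_idx = len(array[0]) // 2
--
--             for i in range(0, len(array) // 2):
--                 one.append(array[i][:col_idx])
--                 two.append(array[i][col_idx:])
--
--             for i in range(len(array) // 2, len(array)):
--                 four.append(array[i][:col_idx])
--                 three.append(array[i][col_idx:])
--
--             tmp_arr = []
--             for i in range(len(one)):
--                 tmp_arr.append(four[i] + one[i])
--
--             for i in range(len(three)):
--                 tmp_arr.append(three[i] + two[i])
--
--             array = tmp_arr
--         elif op == 6:
--             # 6번 연산
--             one = []
--             two = []
--             three = []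
--             four = []
--
--             col_idx = len(array[0]) // 2
--
--             for i in range(0, len(array) // 2):
--                 one.append(array[i][:col_idx])
--                 two.append(array[i][col_idx:])
--
--             for i in range(len(array) // 2, len(array)):
--                 four.append(array[i][:col_idx])
--                 three.append(array[i][col_idx:])
--
--             tmp_arr = []
--             for i in range(len(one)):
--                 tmp_arr.append(two[i] + three[i])
--
--             for i in range(len(three)):
--                 tmp_arr.append(one[i] + four[i])
--
--             array = tmp_arr
--
--     return array
-- ===== SOURCE B (Python) =====
-- def process(operations, array):
--     for op in operations:
--         if op == 1:
--             array = array[::-1]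
--         elif op == 2:
--             array = [row[::-1] for row in array]
--         elif op == 3:
--             n, m = len(array), len(array[0])
--             array = [[array[n - 1 - j][i] for j in range(n)] for i in range(m)]
--         elif op == 4:
--             n, m = len(array), len(array[0])
--             array = [[array[j][m - 1 - i] for j in range(n)] for i in range(m)]
--         elif op == 5 or op == 6:
--             n = len(array)
--             h, c = n // 2, len(array[0]) // 2
--             if op == 5:
--                 array = [array[h + i][:c] + array[i][:c] for i in range(h)] + \
--                         [array[h + i][c:] + array[i][c:] for i in range(n - h)]
--             else:
--                 array = [array[i][c:] + array[h + i][c:] for i in range(h)] + \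
--                         [array[i][:c] + array[h + i][:c] for i in range(n - h)]
--     return array
-- ===== Notes on version B (the rewrite author's own statement) =====
-- stated objective: simpler
-- what changed: B replaces A's in-place swap loop by list reversal, A's flip/mirror-then-transpose (built by nested append loops into pre-allocated empty rows) by single index-mapped comprehensions new[i][j]=old[n-1-j][i] / old[j][m-1-i], and A's four named quadrant lists recombined in two extra loops by direct one-pass assembly of each output row from two slices.
-- outside the precondition, e.g. on process([4], [[1, 2], [3, 4, 5]]): A returns [[2, 5], [1, 4]], B returns [[2, 4], [1, 3]]; on process([3], [[]]): A returns [], B returns []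
import Mathlib
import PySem

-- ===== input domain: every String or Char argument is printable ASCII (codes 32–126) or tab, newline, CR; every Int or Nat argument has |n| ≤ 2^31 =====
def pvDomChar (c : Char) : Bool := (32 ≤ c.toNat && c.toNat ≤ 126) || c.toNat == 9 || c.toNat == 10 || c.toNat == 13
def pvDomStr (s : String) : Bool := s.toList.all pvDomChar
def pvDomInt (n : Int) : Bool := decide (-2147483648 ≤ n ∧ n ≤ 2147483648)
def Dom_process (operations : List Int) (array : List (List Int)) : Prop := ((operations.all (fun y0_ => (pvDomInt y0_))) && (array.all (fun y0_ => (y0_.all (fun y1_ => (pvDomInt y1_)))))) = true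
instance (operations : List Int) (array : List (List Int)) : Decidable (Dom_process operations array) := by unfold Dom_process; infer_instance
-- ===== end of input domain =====

-- B replaces A's swap/flip-then-transpose/quadrant-list machinery by direct index-mapped or
-- slice-assembled constructions (objective: simpler).  A mutates `array`'s rows in place for
-- ops 1/2; B does not — the equivalence proved here is about the RETURN value only.

-- ===== PORT A =====
-- 'for i in range(len(array)//2): array[i], array[-1-i] = array[-1-i], array[i]'
def aFlip (a : List (List Int)) : List (List Int) :=
  (PySem.List.pyRange 0 (PySem.Int.floordiv (PySem.List.len a) 2)).foldl
    (fun acc i =>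
      let rhs := (PySem.List.pyGetD acc (-1 - i) [], PySem.List.pyGetD acc i [])
      PySem.List.pySetD (PySem.List.pySetD acc i rhs.1) (-1 - i) rhs.2) a

-- 'for i in range(len(array)): array[i].reverse()'
def aRev2 (a : List (List Int)) : List (List Int) :=
  (PySem.List.pyRange 0 (PySem.List.len a)).foldl
    (fun acc i => PySem.List.pySetD acc i (PySem.List.pyGetD acc i []).reverse) a

-- 'tmp_arr = [[] for _ in range(len(array[0]))]; for i: for j: tmp_arr[i].append(array[j][i])'
def aTranspose (a : List (List Int)) : List (List Int) :=
  (PySem.List.pyRange 0 (PySem.List.len (PySem.List.pyGetD a 0 []))).map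
    (fun i => (PySem.List.pyRange 0 (PySem.List.len a)).foldl
      (fun row j => row ++ [PySem.List.pyGetD (PySem.List.pyGetD a j []) i 0]) [])

-- ops 5/6: the four quadrant lists one/two/three/four and their two-stage recombination
def aQuad (op : Int) (a : List (List Int)) : List (List Int) :=
  let colIdx := PySem.Int.floordiv (PySem.List.len (PySem.List.pyGetD a 0 [])) 2
  let one := (PySem.List.pyRange 0 (PySem.Int.floordiv (PySem.List.len a) 2)).map
      (fun i => PySem.List.slice (PySem.List.pyGetD a i []) none (some colIdx))
  let two := (PySem.List.pyRange 0 (PySem.Int.floordiv (PySem.List.len a) 2)).map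
      (fun i => PySem.List.slice (PySem.List.pyGetD a i []) (some colIdx) none)
  let four := (PySem.List.pyRange (PySem.Int.floordiv (PySem.List.len a) 2) (PySem.List.len a)).map
      (fun i => PySem.List.slice (PySem.List.pyGetD a i []) none (some colIdx))
  let three := (PySem.List.pyRange (PySem.Int.floordiv (PySem.List.len a) 2) (PySem.List.len a)).map
      (fun i => PySem.List.slice (PySem.List.pyGetD a i []) (some colIdx) none)
  if op = 5 then
    (PySem.List.pyRange 0 (PySem.List.len one)).map
      (fun i => PySem.List.pyGetD four i [] ++ PySem.List.pyGetD one i []) ++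
    (PySem.List.pyRange 0 (PySem.List.len three)).map
      (fun i => PySem.List.pyGetD three i [] ++ PySem.List.pyGetD two i [])
  else
    (PySem.List.pyRange 0 (PySem.List.len one)).map
      (fun i => PySem.List.pyGetD two i [] ++ PySem.List.pyGetD three i [])  ++
    (PySem.List.pyRange 0 (PySem.List.len three)).map
      (fun i => PySem.List.pyGetD one i [] ++ PySem.List.pyGetD four i [])

def aStep (a : List (List Int)) (op : Int) : List (List Int) :=
  if op = 1 then aFlip a
  else if op = 2 then aRev2 a
  else if op = 3 then aTranspose (aFlip a)
  else if op = 4 then aTranspose (aRev2 a)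
  else if op = 5 then aQuad 5 a
  else if op = 6 then aQuad 6 a
  else a

def process (operations : List Int) (array : List (List Int)) : List (List Int) :=
  operations.foldl aStep array

-- ===== PORT B =====
def bStep (a : List (List Int)) (op : Int) : List (List Int) :=
  if op = 1 then a.reverse
  else if op = 2 then a.map List.reverse
  else if op = 3 then
    (List.range (a.getD 0 []).length).map (fun i =>
      (List.range a.length).map (fun j => (a.getD (a.length - 1 - j) []).getD i 0))
  else if op = 4 then
    (List.range (a.getD 0 []).length).map (fun i =>
      (List.range a.length).map (fun j => (a.getD j []).getD ((a.getD 0 []).length - 1 - i) 0))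
  else if op = 5 ∨ op = 6 then
    let n := a.length
    let h := n / 2
    let c := (a.getD 0 []).length / 2
    if op = 5 then
      (List.range h).map (fun i => (a.getD (h+i) []).take c ++ (a.getD i []).take c) ++
      (List.range (n-h)).map (fun i => (a.getD (h+i) []).drop c ++ (a.getD i []).drop c)
    else
      (List.range h).map (fun i => (a.getD i []).drop c ++ (a.getD (h+i) []).drop c) ++
      (List.range (n-h)).map (fun i => (a.getD i []).take c ++ (a.getD (h+i) []).take c)
  else a

def process_alt (operations : List Int) (array : List (List Int)) : List (List Int) :=
  operations.foldl bStep array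

-- ===== PRECONDITION & SPEC =====
-- Pre_ excludes inputs on which A raises IndexError (an empty matrix, or one made empty/ragged by
-- earlier ops, hit by a rotation 3/4; an odd row count hit by op 5/6) and the ragged or odd-width
-- matrices, combined with ops 3/4, on which A's transpose silently truncates every row to row 0's
-- length — an artefact of A's implementation.
def Pre_process (operations : List Int) (array : List (List Int)) : Prop :=
  (((3:Int) ∈ operations ∨ (4:Int) ∈ operations) →
     array ≠ [] ∧ (∀ r ∈ array, r.length = (array.getD 0 []).length) ∧
     0 < (array.getD 0 []).length ∧
     (((5:Int) ∈ operations ∨ (6:Int) ∈ operations) → (array.getD 0 []).length % 2 = 0)) ∧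
  (((5:Int) ∈ operations ∨ (6:Int) ∈ operations) → array ≠ [] ∧ array.length % 2 = 0)
instance (operations : List Int) (array : List (List Int)) : Decidable (Pre_process operations array) := by unfold Pre_process; infer_instance

def pvWitness_process : List Int × List (List Int) := ([3, 5, 1, 2], [[1, 2], [3, 4]])

def Spec_process (operations : List Int) (array : List (List Int)) (out : List (List Int)) : Prop := out = process_alt operations array
instance (operations : List Int) (array : List (List Int)) (out : List (List Int)) : Decidable (Spec_process operations array out) := by unfold Spec_process; infer_instance

-- ===== CLAIM =====
def Claim_equal_process : Prop := ∀ (operations : List Int) (array : List (List Int)), Dom_process operations array → Pre_process operations array → Spec_process operations array (process operations array)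

-- ===== LEMMAS AND PROOFS =====
theorem pySetD_neg {α : Type} (xs : List α) (k : Nat) (v : α) (h1 : 0 < k) (h2 : k ≤ xs.length) :
    PySem.List.pySetD xs (-(k:Int)) v = xs.set (xs.length - k) v := by
  have h4 : -((xs.length:Int)) ≤ -(k:Int) := by omega
  have h0 : k ≠ 0 := by omega
  simp [PySem.List.pySetD, PySem.List.pySet?, PySem.List.pyIdx?, h4, h0]

theorem flip_loop (a : List (List Int)) (t : Nat) (ht : t ≤ a.length / 2) :
    ((List.range t).foldl (fun acc (k : Nat) =>
      let rhs := (PySem.List.pyGetD acc (-1 - (k:Int)) [], PySem.List.pyGetD acc (k:Int) [])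
      PySem.List.pySetD (PySem.List.pySetD acc (k:Int) rhs.1) (-1 - (k:Int)) rhs.2) a).length = a.length ∧
    ∀ k, k < a.length → ((List.range t).foldl (fun acc (k : Nat) =>
      let rhs := (PySem.List.pyGetD acc (-1 - (k:Int)) [], PySem.List.pyGetD acc (k:Int) [])
      PySem.List.pySetD (PySem.List.pySetD acc (k:Int) rhs.1) (-1 - (k:Int)) rhs.2) a)[k]? =
      if k < t ∨ a.length - t ≤ k then a[a.length - 1 - k]? else a[k]? := by
  induction t with
  | zero =>
    refine ⟨by simp, fun k hk => ?_⟩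
    simp only [List.range_zero, List.foldl_nil]
    rw [if_neg (by omega)]
  | succ t ih =>
    obtain ⟨ihl, ihg⟩ := ih (by omega)
    set F := (fun acc (k : Nat) =>
      let rhs := (PySem.List.pyGetD acc (-1 - (k:Int)) [], PySem.List.pyGetD acc (k:Int) [])
      PySem.List.pySetD (PySem.List.pySetD acc (k:Int) rhs.1) (-1 - (k:Int)) rhs.2) with hF
    set A := (List.range t).foldl F a with hA
    have hn2 : 2 * (t + 1) ≤ a.length := by omega
    have hstep : (List.range (t+1)).foldl F a = F A t := by
      rw [List.range_succ, List.foldl_append, List.foldl_cons, List.foldl_nil]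
    have hneg : (-1 - (t:Int)) = -(((t+1 : Nat)):Int) := by push_cast; ring
    set x := PySem.List.pyGetD A (-1 - (t:Int)) [] with hxd
    set y := PySem.List.pyGetD A (t:Int) [] with hyd
    have hx : (some x : Option (List Int)) = a[a.length - 1 - t]? := by
      rw [hxd, hneg, PySem.List.pyGetD_neg_natCast A (t+1) [] (by omega) (by omega),
        ← List.getElem?_eq_getElem, ihl, ihg _ (by omega), if_neg (by omega)]
      congr 1; omega
    have hy : (some y : Option (List Int)) = a[t]? := by
      rw [hyd, PySem.List.pyGetD_natCast, List.getD_eq_getElem _ _ (by omega),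
        ← List.getElem?_eq_getElem, ihg t (by omega), if_neg (by omega)]
    have hFA : F A t = (A.set t x).set (a.length - (t+1)) y := by
      conv_lhs => rw [hF]
      simp only [← hxd, ← hyd]
      rw [PySem.List.pySetD_natCast, hneg,
        pySetD_neg _ (t+1) _ (by omega) (by rw [List.length_set, ihl]; omega)]
      simp only [List.length_set, ihl]
    refine ⟨by rw [hstep, hFA]; simp [ihl], fun k hk => ?_⟩
    rw [hstep, hFA, List.getElem?_set, List.getElem?_set]
    simp only [List.length_set, ihl]
    by_cases hc1 : a.length - (t+1) = k
    · rw [if_pos hc1, if_pos (by omega), ← hc1, hy, if_pos (by omega)]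
      congr 1; omega
    · rw [if_neg hc1]
      by_cases hc2 : t = k
      · rw [if_pos hc2, if_pos (by omega), ← hc2, hx, if_pos (by omega)]
      · rw [if_neg hc2, ihg k hk]
        by_cases hc3 : k < t ∨ a.length - t ≤ k
        · rw [if_pos hc3, if_pos (by omega)]
        · rw [if_neg hc3, if_neg (by omega)]

theorem aFlip_eq (a : List (List Int)) : aFlip a = a.reverse := by
  have hfd : PySem.Int.floordiv ((a.length : Int)) 2 = ((a.length / 2 : Nat) : Int) := by
    exact_mod_cast PySem.Int.floordiv_natCast a.length 2
  have h1 : aFlip a = (List.range (a.length / 2)).foldl (fun acc (k : Nat) =>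
      let rhs := (PySem.List.pyGetD acc (-1 - (k:Int)) [], PySem.List.pyGetD acc (k:Int) [])
      PySem.List.pySetD (PySem.List.pySetD acc (k:Int) rhs.1) (-1 - (k:Int)) rhs.2) a := by
    rw [aFlip, show PySem.List.len a = (a.length : Int) from by simp [PySem.List.len_eq],
      hfd, PySem.List.pyRange_zero_nat, List.foldl_map]
  obtain ⟨hl, hg⟩ := flip_loop a (a.length / 2) le_rfl
  rw [h1]
  apply List.ext_getElem?
  intro k
  by_cases hk : k < a.length
  · rw [hg k hk, List.getElem?_reverse (by omega)]
    by_cases hc : k < a.length / 2 ∨ a.length - a.length / 2 ≤ k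
    · rw [if_pos hc]
    · rw [if_neg hc]
      congr 1; omega
  · rw [List.getElem?_eq_none (by rw [hl]; omega), List.getElem?_eq_none (by rw [List.length_reverse]; omega)]

theorem rev2_loop (a : List (List Int)) (t : Nat) (ht : t ≤ a.length) :
    ((List.range t).foldl (fun acc (k : Nat) =>
      PySem.List.pySetD acc (k:Int) (PySem.List.pyGetD acc (k:Int) []).reverse) a).length = a.length ∧
    ∀ k, k < a.length → ((List.range t).foldl (fun acc (k : Nat) =>
      PySem.List.pySetD acc (k:Int) (PySem.List.pyGetD acc (k:Int) []).reverse) a)[k]? =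
      if k < t then a[k]?.map List.reverse else a[k]? := by
  induction t with
  | zero =>
    refine ⟨by simp, fun k hk => ?_⟩
    simp only [List.range_zero, List.foldl_nil]
    rw [if_neg (by omega)]
  | succ t ih =>
    obtain ⟨ihl, ihg⟩ := ih (by omega)
    set F := (fun acc (k : Nat) =>
      PySem.List.pySetD acc (k:Int) (PySem.List.pyGetD acc (k:Int) []).reverse) with hF
    set A := (List.range t).foldl F a with hA
    have hstep : (List.range (t+1)).foldl F a = F A t := by
      rw [List.range_succ, List.foldl_append, List.foldl_cons, List.foldl_nil]
    set y := PySem.List.pyGetD A (t:Int) [] with hyd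
    have hy : (some y : Option (List Int)) = a[t]? := by
      rw [hyd, PySem.List.pyGetD_natCast, List.getD_eq_getElem _ _ (by omega),
        ← List.getElem?_eq_getElem, ihg t (by omega), if_neg (by omega)]
    have hFA : F A t = A.set t y.reverse := by
      conv_lhs => rw [hF]
      simp only [← hyd]
      rw [PySem.List.pySetD_natCast]
    refine ⟨by rw [hstep, hFA]; simp [ihl], fun k hk => ?_⟩
    rw [hstep, hFA, List.getElem?_set]
    simp only [ihl]
    by_cases hc1 : t = k
    · rw [if_pos hc1, if_pos (by omega), if_pos (by omega), ← hc1, ← hy]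
      simp
    · rw [if_neg hc1, ihg k hk]
      by_cases hc2 : k < t
      · rw [if_pos hc2, if_pos (by omega)]
      · rw [if_neg hc2, if_neg (by omega)]

theorem aRev2_eq (a : List (List Int)) : aRev2 a = a.map List.reverse := by
  have h1 : aRev2 a = (List.range a.length).foldl (fun acc (k : Nat) =>
      PySem.List.pySetD acc (k:Int) (PySem.List.pyGetD acc (k:Int) []).reverse) a := by
    rw [aRev2, show PySem.List.len a = (a.length : Int) from by simp [PySem.List.len_eq],
      PySem.List.pyRange_zero_nat, List.foldl_map]
  obtain ⟨hl, hg⟩ := rev2_loop a a.length le_rfl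
  rw [h1]
  apply List.ext_getElem?
  intro k
  by_cases hk : k < a.length
  · rw [hg k hk, if_pos hk, List.getElem?_map]
  · rw [List.getElem?_eq_none (by rw [hl]; omega), List.getElem?_eq_none (by rw [List.length_map]; omega)]

theorem aTranspose_eq (a : List (List Int)) : aTranspose a =
    (List.range (a.getD 0 []).length).map (fun i =>
      (List.range a.length).map (fun j => (a.getD j []).getD i 0)) := by
  rw [aTranspose]
  simp only [PySem.List.len_eq, PySem.List.pyGetD_zero, PySem.List.pyRange_zero_nat,
    PySem.List.foldl_append_singleton_eq_map, List.map_map, List.nil_append]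
  apply List.map_congr_left
  intro i _hi
  simp [PySem.List.pyGetD_natCast]

theorem getD_reverse (a : List (List Int)) (j : Nat) (hj : j < a.length) :
    a.reverse.getD j [] = a.getD (a.length - 1 - j) [] := by
  simp only [List.getD_eq_getElem?_getD]
  rw [List.getElem?_reverse (by omega)]

theorem getD_mem (a : List (List Int)) (k : Nat) (hk : k < a.length) : a.getD k [] ∈ a := by
  rw [List.getD_eq_getElem _ _ hk]; exact List.getElem_mem hk

theorem step3 (a : List (List Int))
    (hrect : ∀ r ∈ a, r.length = (a.getD 0 []).length) :
    aTranspose a.reverse =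
    (List.range (a.getD 0 []).length).map (fun i =>
      (List.range a.length).map (fun j => (a.getD (a.length - 1 - j) []).getD i 0)) := by
  rw [aTranspose_eq]
  rcases a with - | ⟨r, rs⟩
  · simp
  · set a := r :: rs with ha
    have hne : a ≠ [] := by simp [ha]
    have hw : (a.reverse.getD 0 []).length = (a.getD 0 []).length := by
      have h0 : a.reverse.getD 0 [] = a.getD (a.length - 1 - 0) [] := getD_reverse a 0 (by simp [ha])
      rw [h0]
      exact hrect _ (getD_mem a _ (by simp [ha]))
    rw [List.length_reverse, hw]
    apply List.map_congr_left
    intro i _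
    apply List.map_congr_left
    intro j hj
    rw [getD_reverse a j (by simpa using hj)]

theorem getD_reverse_row (l : List Int) (i : Nat) (hi : i < l.length) :
    l.reverse.getD i 0 = l.getD (l.length - 1 - i) 0 := by
  simp only [List.getD_eq_getElem?_getD]
  rw [List.getElem?_reverse hi]

theorem step4 (a : List (List Int))
    (hrect : ∀ r ∈ a, r.length = (a.getD 0 []).length) :
    aTranspose (a.map List.reverse) =
    (List.range (a.getD 0 []).length).map (fun i =>
      (List.range a.length).map (fun j => (a.getD j []).getD ((a.getD 0 []).length - 1 - i) 0)) := by
  rw [aTranspose_eq]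
  rcases a with - | ⟨r, rs⟩
  · simp
  · set a := r :: rs with ha
    have hw : ((a.map List.reverse).getD 0 []).length = (a.getD 0 []).length := by
      simp [ha]
    rw [List.length_map, hw]
    apply List.map_congr_left
    intro i hi
    apply List.map_congr_left
    intro j hj
    have hj' : j < a.length := by simpa using hj
    have hrow : (a.map List.reverse).getD j [] = (a.getD j []).reverse := by
      simp only [List.getD_eq_getElem?_getD, List.getElem?_map]
      rw [List.getElem?_eq_getElem hj']
      simp
    have hlen : (a.getD j []).length = (a.getD 0 []).length := hrect _ (getD_mem a j hj')
    have hi' : i < (a.getD j []).length := by rw [hlen]; simpa using hi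
    rw [hrow, getD_reverse_row _ i hi', hlen]

theorem quad_get_one (a : List (List Int)) (cI : Int) (i h : Nat) (hi : i < h) :
    PySem.List.pyGetD ((PySem.List.pyRange 0 ((h:Nat):Int)).map
      (fun i => PySem.List.slice (PySem.List.pyGetD a i []) none (some cI))) ((i:Nat):Int) [] =
    PySem.List.slice (a.getD i []) none (some cI) := by
  rw [PySem.List.pyGetD_map_pyRange _ h i [] hi, PySem.List.pyGetD_natCast]

theorem quad_get_four (a : List (List Int)) (cI : Int) (i h n : Nat) (hi : i < n - h) :
    PySem.List.pyGetD ((PySem.List.pyRange ((h:Nat):Int) ((n:Nat):Int)).map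
      (fun i => PySem.List.slice (PySem.List.pyGetD a i []) none (some cI))) ((i:Nat):Int) [] =
    PySem.List.slice (a.getD (h + i) []) none (some cI) := by
  rw [PySem.List.pyGetD_map_pyRange_one _ _ _ i [] (by omega)]
  rw [show ((h:Int) + (i:Int)) = (((h+i : Nat)):Int) by push_cast; ring, PySem.List.pyGetD_natCast]

theorem quad_get_two (a : List (List Int)) (cI : Int) (i h : Nat) (hi : i < h) :
    PySem.List.pyGetD ((PySem.List.pyRange 0 ((h:Nat):Int)).map
      (fun i => PySem.List.slice (PySem.List.pyGetD a i []) (some cI) none)) ((i:Nat):Int) [] =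
    PySem.List.slice (a.getD i []) (some cI) none := by
  rw [PySem.List.pyGetD_map_pyRange _ h i [] hi, PySem.List.pyGetD_natCast]

theorem quad_get_three (a : List (List Int)) (cI : Int) (i h n : Nat) (hi : i < n - h) :
    PySem.List.pyGetD ((PySem.List.pyRange ((h:Nat):Int) ((n:Nat):Int)).map
      (fun i => PySem.List.slice (PySem.List.pyGetD a i []) (some cI) none)) ((i:Nat):Int) [] =
    PySem.List.slice (a.getD (h + i) []) (some cI) none := by
  rw [PySem.List.pyGetD_map_pyRange_one _ _ _ i [] (by omega)]
  rw [show ((h:Int) + (i:Int)) = (((h+i : Nat)):Int) by push_cast; ring, PySem.List.pyGetD_natCast]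

theorem map_pyRange_zero_eq_map_range {β : Type} (f : Int → β) (g : Nat → β) (h : Nat)
    (heq : ∀ k, k < h → f ((k:Nat):Int) = g k) :
    (PySem.List.pyRange 0 ((h:Nat):Int)).map f = (List.range h).map g := by
  rw [PySem.List.pyRange_zero_nat, List.map_map]
  apply List.map_congr_left
  intro k hk
  exact heq k (by simpa using hk)

theorem aQuad_eq5 (a : List (List Int)) (hn : a.length % 2 = 0) :
    aQuad 5 a =
    (List.range (a.length / 2)).map (fun i =>
        (a.getD (a.length / 2 + i) []).take ((a.getD 0 []).length / 2) ++
        (a.getD i []).take ((a.getD 0 []).length / 2)) ++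
    (List.range (a.length - a.length / 2)).map (fun i =>
        (a.getD (a.length / 2 + i) []).drop ((a.getD 0 []).length / 2) ++
        (a.getD i []).drop ((a.getD 0 []).length / 2)) := by
  have hfd : PySem.Int.floordiv ((a.length : Int)) 2 = ((a.length / 2 : Nat) : Int) := by
    exact_mod_cast PySem.Int.floordiv_natCast a.length 2
  have hfc : PySem.Int.floordiv (((a.getD 0 []).length : Int)) 2 = (((a.getD 0 []).length / 2 : Nat) : Int) := by
    exact_mod_cast PySem.Int.floordiv_natCast (a.getD 0 []).length 2
  have h34 : (((a.length : Int)) - ((a.length / 2 : Nat) : Int)).toNat = a.length - a.length / 2 := by omega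
  rw [aQuad]
  simp only [PySem.List.len_eq, PySem.List.pyGetD_zero, hfd, hfc,
    List.length_map, PySem.List.length_pyRange_one, sub_zero, Int.toNat_natCast, h34]
  rw [if_pos trivial]
  congr 1
  · apply map_pyRange_zero_eq_map_range
    intro i hi
    rw [quad_get_four a _ i (a.length / 2) a.length (by omega),
      quad_get_one a _ i (a.length / 2) hi,
      PySem.List.slice_to_natCast, PySem.List.slice_to_natCast]
  · apply map_pyRange_zero_eq_map_range
    intro i hi
    rw [quad_get_three a _ i (a.length / 2) a.length (by omega),
      quad_get_two a _ i (a.length / 2) (by omega),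
      PySem.List.slice_from_natCast, PySem.List.slice_from_natCast]

theorem aQuad_eq6 (a : List (List Int)) (hn : a.length % 2 = 0) :
    aQuad 6 a =
    (List.range (a.length / 2)).map (fun i =>
        (a.getD i []).drop ((a.getD 0 []).length / 2) ++
        (a.getD (a.length / 2 + i) []).drop ((a.getD 0 []).length / 2)) ++
    (List.range (a.length - a.length / 2)).map (fun i =>
        (a.getD i []).take ((a.getD 0 []).length / 2) ++
        (a.getD (a.length / 2 + i) []).take ((a.getD 0 []).length / 2)) := by
  have hfd : PySem.Int.floordiv ((a.length : Int)) 2 = ((a.length / 2 : Nat) : Int) := by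
    exact_mod_cast PySem.Int.floordiv_natCast a.length 2
  have hfc : PySem.Int.floordiv (((a.getD 0 []).length : Int)) 2 = (((a.getD 0 []).length / 2 : Nat) : Int) := by
    exact_mod_cast PySem.Int.floordiv_natCast (a.getD 0 []).length 2
  have h34 : (((a.length : Int)) - ((a.length / 2 : Nat) : Int)).toNat = a.length - a.length / 2 := by omega
  rw [aQuad]
  simp only [PySem.List.len_eq, PySem.List.pyGetD_zero, hfd, hfc,
    List.length_map, PySem.List.length_pyRange_one, sub_zero, Int.toNat_natCast, h34]
  rw [if_neg (by decide)]
  congr 1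
  · apply map_pyRange_zero_eq_map_range
    intro i hi
    rw [quad_get_three a _ i (a.length / 2) a.length (by omega),
      quad_get_two a _ i (a.length / 2) hi,
      PySem.List.slice_from_natCast, PySem.List.slice_from_natCast]
  · apply map_pyRange_zero_eq_map_range
    intro i hi
    rw [quad_get_four a _ i (a.length / 2) a.length (by omega),
      quad_get_one a _ i (a.length / 2) (by omega),
      PySem.List.slice_to_natCast, PySem.List.slice_to_natCast]


theorem step_eq_1 (a : List (List Int)) : aStep a 1 = bStep a 1 := by
  simp only [aStep, bStep]
  norm_num
  exact aFlip_eq a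

theorem step_eq_2 (a : List (List Int)) : aStep a 2 = bStep a 2 := by
  simp only [aStep, bStep]
  norm_num
  exact aRev2_eq a

theorem step_eq_3 (a : List (List Int))
    (hrect : ∀ r ∈ a, r.length = (a.getD 0 []).length) :
    aStep a 3 = bStep a 3 := by
  simp only [aStep, bStep]
  norm_num
  rw [aFlip_eq]
  exact step3 a hrect

theorem step_eq_4 (a : List (List Int))
    (hrect : ∀ r ∈ a, r.length = (a.getD 0 []).length) :
    aStep a 4 = bStep a 4 := by
  simp only [aStep, bStep]
  norm_num
  rw [aRev2_eq]
  exact step4 a hrect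

theorem step_eq_5 (a : List (List Int)) (hn : a.length % 2 = 0) :
    aStep a 5 = bStep a 5 := by
  simp only [aStep, bStep]
  norm_num
  exact aQuad_eq5 a hn

theorem step_eq_6 (a : List (List Int)) (hn : a.length % 2 = 0) :
    aStep a 6 = bStep a 6 := by
  simp only [aStep, bStep]
  norm_num
  exact aQuad_eq6 a hn

theorem step_other (a : List (List Int)) (op : Int)
    (h1 : op ≠ 1) (h2 : op ≠ 2) (h3 : op ≠ 3) (h4 : op ≠ 4) (h5 : op ≠ 5) (h6 : op ≠ 6) :
    aStep a op = a ∧ bStep a op = a := by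
  constructor <;> simp [aStep, bStep, h1, h2, h3, h4, h5, h6]


theorem bStep1_def (a : List (List Int)) : bStep a 1 = a.reverse := by simp [bStep]
theorem bStep2_def (a : List (List Int)) : bStep a 2 = a.map List.reverse := by simp [bStep]
theorem bStep3_def (a : List (List Int)) : bStep a 3 =
    (List.range (a.getD 0 []).length).map (fun i =>
      (List.range a.length).map (fun j => (a.getD (a.length - 1 - j) []).getD i 0)) := by
  simp [bStep]
theorem bStep4_def (a : List (List Int)) : bStep a 4 =
    (List.range (a.getD 0 []).length).map (fun i =>
      (List.range a.length).map (fun j => (a.getD j []).getD ((a.getD 0 []).length - 1 - i) 0)) := by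
  simp [bStep]
theorem bStep5_def (a : List (List Int)) : bStep a 5 =
    (List.range (a.length / 2)).map (fun i =>
        (a.getD (a.length / 2 + i) []).take ((a.getD 0 []).length / 2) ++
        (a.getD i []).take ((a.getD 0 []).length / 2)) ++
    (List.range (a.length - a.length / 2)).map (fun i =>
        (a.getD (a.length / 2 + i) []).drop ((a.getD 0 []).length / 2) ++
        (a.getD i []).drop ((a.getD 0 []).length / 2)) := by
  simp [bStep]
theorem bStep6_def (a : List (List Int)) : bStep a 6 =
    (List.range (a.length / 2)).map (fun i =>
        (a.getD i []).drop ((a.getD 0 []).length / 2) ++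
        (a.getD (a.length / 2 + i) []).drop ((a.getD 0 []).length / 2)) ++
    (List.range (a.length - a.length / 2)).map (fun i =>
        (a.getD i []).take ((a.getD 0 []).length / 2) ++
        (a.getD (a.length / 2 + i) []).take ((a.getD 0 []).length / 2)) := by
  simp [bStep]

theorem getD0_rangemap {β : Type} (w : Nat) (f : Nat → β) (d : β) (hw : 0 < w) :
    ((List.range w).map f).getD 0 d = f 0 := by
  rw [List.getD_eq_getElem _ _ (by simpa using hw)]
  simp

theorem rev_shape (a : List (List Int)) (hne : a ≠ [])
    (hrect : ∀ r ∈ a, r.length = (a.getD 0 []).length) :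
    (a.reverse.getD 0 []).length = (a.getD 0 []).length ∧
    (∀ r ∈ a.reverse, r.length = (a.reverse.getD 0 []).length) := by
  have hmem : a.reverse.getD 0 [] ∈ a := by
    have := getD_mem a.reverse 0 (by rw [List.length_reverse]; exact List.length_pos_iff.mpr hne)
    exact List.mem_reverse.mp this
  have hw := hrect _ hmem
  exact ⟨hw, fun r hr => by rw [hrect r (List.mem_reverse.mp hr), hw]⟩

theorem maprev_shape (a : List (List Int)) (hne : a ≠ [])
    (hrect : ∀ r ∈ a, r.length = (a.getD 0 []).length) :
    ((a.map List.reverse).getD 0 []).length = (a.getD 0 []).length ∧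
    (∀ r ∈ a.map List.reverse, r.length = ((a.map List.reverse).getD 0 []).length) := by
  rcases a with - | ⟨r0, rs⟩
  · exact absurd rfl hne
  · refine ⟨by simp, ?_⟩
    intro r hr
    simp only [List.mem_map] at hr
    obtain ⟨s, hs, rfl⟩ := hr
    simp only [List.length_reverse]
    rw [hrect s hs]
    simp

theorem quad_shape (a : List (List Int)) (op : Int) (hop : op = 5 ∨ op = 6)
    (hne : a ≠ []) (hneven : a.length % 2 = 0)
    (hrect : ∀ r ∈ a, r.length = (a.getD 0 []).length)
    (hweven : (a.getD 0 []).length % 2 = 0) :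
    bStep a op ≠ [] ∧ (bStep a op).length = a.length ∧
    ((bStep a op).getD 0 []).length = (a.getD 0 []).length ∧
    (∀ r ∈ bStep a op, r.length = (a.getD 0 []).length) := by
  have hn : 0 < a.length := List.length_pos_iff.mpr hne
  have hh : 0 < a.length / 2 := by omega
  have hrow : ∀ k, k < a.length → (a.getD k []).length = (a.getD 0 []).length :=
    fun k hk => hrect _ (getD_mem a k hk)
  have hlenparts : ∀ (r : List (List Int)), r = bStep a op →
      (∀ r' ∈ r, r'.length = (a.getD 0 []).length) := by
    intro r hr r' hr'
    rcases hop with rfl | rfl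
    · rw [bStep5_def] at hr
      subst hr
      rcases List.mem_append.mp hr' with h | h
      · obtain ⟨i, hi, rfl⟩ := List.mem_map.mp h
        have hi' : i < a.length / 2 := by simpa using hi
        simp only [List.length_append, List.length_take]
        rw [hrow (a.length / 2 + i) (by omega), hrow i (by omega)]
        omega
      · obtain ⟨i, hi, rfl⟩ := List.mem_map.mp h
        have hi' : i < a.length - a.length / 2 := by simpa using hi
        simp only [List.length_append, List.length_drop]
        rw [hrow (a.length / 2 + i) (by omega), hrow i (by omega)]
        omega
    · rw [bStep6_def] at hr
      subst hr
      rcases List.mem_append.mp hr' with h | h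
      · obtain ⟨i, hi, rfl⟩ := List.mem_map.mp h
        have hi' : i < a.length / 2 := by simpa using hi
        simp only [List.length_append, List.length_drop]
        rw [hrow (a.length / 2 + i) (by omega), hrow i (by omega)]
        omega
      · obtain ⟨i, hi, rfl⟩ := List.mem_map.mp h
        have hi' : i < a.length - a.length / 2 := by simpa using hi
        simp only [List.length_append, List.length_take]
        rw [hrow (a.length / 2 + i) (by omega), hrow i (by omega)]
        omega
  have hlen : (bStep a op).length = a.length := by
    rcases hop with rfl | rfl
    · rw [bStep5_def]; simp; omega
    · rw [bStep6_def]; simp; omega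
  have hbne : bStep a op ≠ [] := by
    intro hcon
    rw [hcon] at hlen
    simp at hlen
    omega
  refine ⟨hbne, hlen, ?_, ?_⟩
  · have : (bStep a op).getD 0 [] ∈ bStep a op :=
      getD_mem _ 0 (by rw [hlen]; omega)
    exact hlenparts _ rfl _ this
  · intro r hr
    exact hlenparts _ rfl r hr

theorem quad_len (a : List (List Int)) (op : Int) (hop : op = 5 ∨ op = 6) :
    (bStep a op).length = a.length := by
  rcases hop with rfl | rfl
  · rw [bStep5_def]; simp; omega
  · rw [bStep6_def]; simp; omega

theorem pre_cons (op : Int) (ops : List Int) (b : List (List Int))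
    (hb34 : ((3:Int) ∈ (op :: ops) ∨ (4:Int) ∈ (op :: ops)) →
       b ≠ [] ∧ (∀ r ∈ b, r.length = (b.getD 0 []).length) ∧ 0 < (b.getD 0 []).length ∧
       (((5:Int) ∈ (op :: ops) ∨ (6:Int) ∈ (op :: ops)) → (b.getD 0 []).length % 2 = 0))
    (hb56 : ((5:Int) ∈ (op :: ops) ∨ (6:Int) ∈ (op :: ops)) → b ≠ [] ∧ b.length % 2 = 0) :
    Pre_process ops b := by
  unfold Pre_process
  refine ⟨fun h => ?_, fun h => hb56 (h.imp (List.mem_cons_of_mem _) (List.mem_cons_of_mem _))⟩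
  obtain ⟨h1, h2, h3, h4⟩ := hb34 (h.imp (List.mem_cons_of_mem _) (List.mem_cons_of_mem _))
  exact ⟨h1, h2, h3, fun h' => h4 (h'.imp (List.mem_cons_of_mem _) (List.mem_cons_of_mem _))⟩

theorem main_ind : ∀ (ops : List Int) (a : List (List Int)), Pre_process ops a →
    List.foldl aStep a ops = List.foldl bStep a ops := by
  intro ops
  induction ops with
  | nil => intro a _; rfl
  | cons op ops ih =>
    intro a hpre
    have h34 := hpre.1
    have h56 := hpre.2
    rw [List.foldl_cons, List.foldl_cons]
    suffices h : aStep a op = bStep a op ∧ Pre_process ops (bStep a op) by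
      rw [h.1]; exact ih _ h.2
    by_cases e1 : op = 1
    · subst e1
      refine ⟨step_eq_1 a, pre_cons 1 ops (bStep a 1) (fun h => ?_) (fun h => ?_)⟩
      · obtain ⟨hne, hrect, hw, hwe⟩ := h34 h
        obtain ⟨hweq, hbrect⟩ := rev_shape a hne hrect
        rw [bStep1_def]
        refine ⟨by simpa using hne, hbrect, by rw [hweq]; exact hw, fun h' => by rw [hweq]; exact hwe h'⟩
      · obtain ⟨hne, hev⟩ := h56 h
        rw [bStep1_def]
        exact ⟨by simpa using hne, by simpa using hev⟩
    by_cases e2 : op = 2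
    · subst e2
      refine ⟨step_eq_2 a, pre_cons 2 ops (bStep a 2) (fun h => ?_) (fun h => ?_)⟩
      · obtain ⟨hne, hrect, hw, hwe⟩ := h34 h
        obtain ⟨hweq, hbrect⟩ := maprev_shape a hne hrect
        rw [bStep2_def]
        refine ⟨by simpa using hne, hbrect, by rw [hweq]; exact hw, fun h' => by rw [hweq]; exact hwe h'⟩
      · obtain ⟨hne, hev⟩ := h56 h
        rw [bStep2_def]
        exact ⟨by simpa using hne, by simpa using hev⟩
    by_cases e3 : op = 3
    · subst e3
      obtain ⟨hne, hrect, hw, hwe⟩ := h34 (Or.inl List.mem_cons_self)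
      have hn : 0 < a.length := List.length_pos_iff.mpr hne
      have hb := bStep3_def a
      have hblen : (bStep a 3).length = (a.getD 0 []).length := by rw [hb]; simp
      have hbne : bStep a 3 ≠ [] := by
        rw [hb]; intro hcon; rw [List.map_eq_nil_iff, List.range_eq_nil] at hcon; omega
      have hbw : ((bStep a 3).getD 0 []).length = a.length := by
        rw [hb, getD0_rangemap _ _ _ hw]; simp
      have hbrect : ∀ r ∈ bStep a 3, r.length = ((bStep a 3).getD 0 []).length := by
        intro r hr
        rw [hbw]
        rw [hb] at hr
        obtain ⟨i, -, rfl⟩ := List.mem_map.mp hr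
        simp
      refine ⟨step_eq_3 a hrect, pre_cons 3 ops (bStep a 3) (fun h => ?_) (fun h => ?_)⟩
      · exact ⟨hbne, hbrect, by rw [hbw]; omega,
          fun h' => by rw [hbw]; exact (h56 h').2⟩
      · refine ⟨hbne, ?_⟩
        rw [hblen]
        exact hwe h
    by_cases e4 : op = 4
    · subst e4
      obtain ⟨hne, hrect, hw, hwe⟩ := h34 (Or.inr List.mem_cons_self)
      have hn : 0 < a.length := List.length_pos_iff.mpr hne
      have hb := bStep4_def a
      have hblen : (bStep a 4).length = (a.getD 0 []).length := by rw [hb]; simp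
      have hbne : bStep a 4 ≠ [] := by
        rw [hb]; intro hcon; rw [List.map_eq_nil_iff, List.range_eq_nil] at hcon; omega
      have hbw : ((bStep a 4).getD 0 []).length = a.length := by
        rw [hb, getD0_rangemap _ _ _ hw]; simp
      have hbrect : ∀ r ∈ bStep a 4, r.length = ((bStep a 4).getD 0 []).length := by
        intro r hr
        rw [hbw]
        rw [hb] at hr
        obtain ⟨i, -, rfl⟩ := List.mem_map.mp hr
        simp
      refine ⟨step_eq_4 a hrect, pre_cons 4 ops (bStep a 4) (fun h => ?_) (fun h => ?_)⟩
      · exact ⟨hbne, hbrect, by rw [hbw]; omega,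
          fun h' => by rw [hbw]; exact (h56 h').2⟩
      · refine ⟨hbne, ?_⟩
        rw [hblen]
        exact hwe h
    by_cases e5 : op = 5 ∨ op = 6
    · obtain ⟨hne, hnev⟩ := h56 (by rcases e5 with rfl | rfl; exacts [Or.inl List.mem_cons_self, Or.inr List.mem_cons_self])
      have heq : aStep a op = bStep a op := by
        rcases e5 with rfl | rfl
        exacts [step_eq_5 a hnev, step_eq_6 a hnev]
      refine ⟨heq, pre_cons op ops (bStep a op) (fun h => ?_) (fun h => ?_)⟩
      · obtain ⟨hne', hrect, hw, hwe⟩ := h34 h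
        have hweven : (a.getD 0 []).length % 2 = 0 := by
          apply hwe
          rcases e5 with rfl | rfl
          exacts [Or.inl List.mem_cons_self, Or.inr List.mem_cons_self]
        obtain ⟨hbne, hblen, hbw, hbrect⟩ := quad_shape a op e5 hne hnev hrect hweven
        refine ⟨hbne, fun r hr => by rw [hbw]; exact hbrect r hr, by rw [hbw]; exact hw,
          fun _ => by rw [hbw]; exact hweven⟩
      · have hq := quad_len a op e5
        have hn0 : 0 < a.length := List.length_pos_iff.mpr hne
        refine ⟨fun hcon => ?_, by rw [hq]; exact hnev⟩
        rw [hcon] at hq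
        simp at hq
        omega
    · obtain ⟨ha, hb⟩ := step_other a op e1 e2 e3 e4 (fun h => e5 (Or.inl h)) (fun h => e5 (Or.inr h))
      refine ⟨by rw [ha, hb], ?_⟩
      rw [hb]
      exact pre_cons op ops a h34 h56

-- ===== VERDICT =====
theorem process_spec : Claim_equal_process := by
  intro ops arr _hdom hpre
  unfold Spec_process process process_alt
  exact main_ind ops arr hpre
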